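-- pv_equiv track=rewrite | github.com/howardh0214/Algorithms-Homework | HW9/count.py | create_odd
-- ===== SOURCE A (Python) =====
-- import math
--
-- def create_odd(n):
--     output = []
--     if n == 1:
--         output = [1]
--     else:
--         for i in range(1, math.ceil(n/2)):
--             output.append(i)
--         for i in range(math.ceil(n/2), 0, -1):
--             output.append(i)
--     return output
-- ===== SOURCE B (Python) =====
-- def create_odd(n):
--     m = -(-n // 2)  # ceil(n/2), exact integer arithmetic
--     return [m - abs(i - (m - 1)) for i in range(2 * m - 1)]
-- ===== Notes on version B (the rewrite author's own statement) =====
-- stated objective: idiomatic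
-- what changed: Replaces the special-cased branch and the two oppositely-directed append loops with a single comprehension over one index range, computing each element by the closed form m - abs(i - (m-1)) with m = ceil(n/2).
import Mathlib
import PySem

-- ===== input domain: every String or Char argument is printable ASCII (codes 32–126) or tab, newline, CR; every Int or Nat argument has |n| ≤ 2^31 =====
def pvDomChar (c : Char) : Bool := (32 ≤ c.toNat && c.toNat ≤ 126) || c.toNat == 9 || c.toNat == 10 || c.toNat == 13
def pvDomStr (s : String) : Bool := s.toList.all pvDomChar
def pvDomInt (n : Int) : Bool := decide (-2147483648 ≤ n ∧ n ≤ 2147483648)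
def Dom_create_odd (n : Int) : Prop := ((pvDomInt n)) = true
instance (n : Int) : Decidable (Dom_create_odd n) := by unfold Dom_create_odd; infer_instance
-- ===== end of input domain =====

-- B replaces A's special-cased branch and two oppositely-directed append loops with one
-- comprehension using the closed form m - |i - (m-1)| (objective: idiomatic, same cost).

-- ===== PORT A =====
-- math.ceil(n/2) ported as -((-n) // 2): exact for every int in Dom (the float n/2 is exact there)
def create_odd (n : Int) : List Int :=
  let output : List Int := []
  if n == 1 then [1]
  else
    let m := -(PySem.Int.floordiv (-n) 2)
    let output := (PySem.List.pyRange 1 m 1).foldl (fun acc i => acc ++ [i]) output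
    let output := (PySem.List.pyRange m 0 (-1)).foldl (fun acc i => acc ++ [i]) output
    output

-- ===== PORT B =====
def create_odd_alt (n : Int) : List Int :=
  let m := -(PySem.Int.floordiv (-n) 2)
  (PySem.List.pyRange 0 (2 * m - 1) 1).map (fun i => m - |i - (m - 1)|)

-- ===== PRECONDITION & SPEC =====
def Spec_create_odd (n : Int) (out : List Int) : Prop := out = create_odd_alt n
instance (n : Int) (out : List Int) : Decidable (Spec_create_odd n out) := by unfold Spec_create_odd; infer_instance

-- ===== CLAIM (what is proved, stated in full; the proofs are below) =====
def Claim_equal_create_odd : Prop := ∀ (n : Int), Dom_create_odd n → Spec_create_odd n (create_odd n)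

-- ===== LEMMAS AND PROOFS =====

-- the append-accumulator loop just concatenates the range onto the accumulator
theorem pv_foldl_app (l init : List Int) :
    l.foldl (fun acc i => acc ++ [i]) init = init ++ l := by
  induction l generalizing init with
  | nil => simp
  | cons x xs ih => simp [List.foldl_cons, ih]

-- the abs-based single pass equals the up-range followed by the down-range
theorem pv_key (m : Int) :
    (PySem.List.pyRange 0 (2 * m - 1) 1).map (fun i => m - |i - (m - 1)|) =
      PySem.List.pyRange 1 m 1 ++ PySem.List.pyRange m 0 (-1) := by
  by_cases hm : m ≤ 0
  · rw [PySem.List.pyRange_one_eq_nil (by omega), PySem.List.pyRange_one_eq_nil (by omega),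
      PySem.List.pyRange_neg_one_eq_nil (by omega)]
    simp
  · rw [not_le] at hm
    rw [PySem.List.pyRange_one_append 0 (m - 1) (2 * m - 1) (by omega) (by omega),
      List.map_append, PySem.List.pyRange_one, PySem.List.pyRange_one,
      PySem.List.pyRange_one 1 m, PySem.List.pyRange_neg_one,
      List.map_map, List.map_map]
    congr 1
    · have hlen : (m - 1 - 0).toNat = (m - 1).toNat := by omega
      rw [hlen]
      apply List.map_congr_left
      intro k hk
      rw [List.mem_range] at hk
      have hk' : (k : Int) < m - 1 := by omega
      simp only [Function.comp]
      rw [abs_of_nonpos (by omega)]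
      omega
    · have hlen : (2 * m - 1 - (m - 1)).toNat = (m - 0).toNat := by omega
      rw [hlen]
      apply List.map_congr_left
      intro k hk
      rw [List.mem_range] at hk
      simp only [Function.comp]
      rw [abs_of_nonneg (by omega)]
      omega

-- ===== VERDICT (by name: the statement is the Claim_ definition above) =====
theorem create_odd_spec : Claim_equal_create_odd := by
  intro n _
  unfold Spec_create_odd create_odd create_odd_alt
  by_cases h1 : n = 1
  · subst h1; decide
  · rw [if_neg (by simpa using h1)]
    simp only [pv_foldl_app, List.nil_append, pv_key]
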